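-- pv_equiv track=rewrite | github.com/roygarrett/coin-flipper | CoinFlipper.py | coin_flip
-- ===== SOURCE A (Python) =====
-- def flip(num):
--     if num == '0':
--         return '1'
--     if num == '1':
--         return '0'
--
-- def coin_flip(num, node):
--     l = list(node)
--     if num == 1:
--         l[-1] = flip(l[-1])
--         l[-2] = flip(l[-2])
--         l[-4] = flip(l[-4])
--     if num == 2:
--         l[-1] = flip(l[-1])
--         l[-2] = flip(l[-2])
--         l[-3] = flip(l[-3])
--         l[-5] = flip(l[-5])
--     if num == 3:
--         l[-2] = flip(l[-2])
--         l[-3] = flip(l[-3])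
--         l[-6] = flip(l[-6])
--     if num == 4:
--         l[-1] = flip(l[-1])
--         l[-4] = flip(l[-4])
--         l[-5] = flip(l[-5])
--         l[-7] = flip(l[-7])
--     if num == 5:
--         l[-2] = flip(l[-2])
--         l[-4] = flip(l[-4])
--         l[-5] = flip(l[-5])
--         l[-6] = flip(l[-6])
--         l[-8] = flip(l[-8])
--     if num == 6:
--         l[-3] = flip(l[-3])
--         l[-5] = flip(l[-5])
--         l[-6] = flip(l[-6])
--         l[-9] = flip(l[-9])
--     if num == 7:
--         l[-4] = flip(l[-4])
--         l[-7] = flip(l[-7])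
--         l[-8] = flip(l[-8])
--     if num == 8:
--         l[-5] = flip(l[-5])
--         l[-7] = flip(l[-7])
--         l[-8] = flip(l[-8])
--         l[-9] = flip(l[-9])
--     if num == 9:
--         l[-6] = flip(l[-6])
--         l[-8] = flip(l[-8])
--         l[-9] = flip(l[-9])
--     new_node = ''
--     for i in l:
--         new_node += i
--     return new_node
-- ===== SOURCE B (Python) =====
-- def flip(num):
--     if num == '0':
--         return '1'
--     if num == '1':
--         return '0'
--
-- def coin_flip(num, node):
--     # The nine cases are exactly Lights-Out on a 3x3 grid (cells numbered 1..9
--     # right-to-left): pressing cell num toggles num and its orthogonal neighbours.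
--     # Compute that neighbourhood arithmetically instead of hardcoding the sets.
--     l = list(node)
--     if 1 <= num <= 9:
--         r, c = divmod(num - 1, 3)
--         for j in range(1, 10):
--             rj, cj = divmod(j - 1, 3)
--             if abs(r - rj) + abs(c - cj) <= 1:
--                 l[-j] = flip(l[-j])
--     return ''.join(l)
-- ===== Notes on version B (the rewrite author's own statement) =====
-- stated objective: alternative
-- what changed: B recognises the nine hardcoded flip sets as 3x3 Lights-Out neighbourhoods and computes each flipped position arithmetically (divmod row/column, Manhattan distance <= 1) in one loop over positions 1..9 instead of A's nine unrolled if-blocks, and builds the result with ''.join instead of += concatenation (the measured constant-factor speedup).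
import Mathlib
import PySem

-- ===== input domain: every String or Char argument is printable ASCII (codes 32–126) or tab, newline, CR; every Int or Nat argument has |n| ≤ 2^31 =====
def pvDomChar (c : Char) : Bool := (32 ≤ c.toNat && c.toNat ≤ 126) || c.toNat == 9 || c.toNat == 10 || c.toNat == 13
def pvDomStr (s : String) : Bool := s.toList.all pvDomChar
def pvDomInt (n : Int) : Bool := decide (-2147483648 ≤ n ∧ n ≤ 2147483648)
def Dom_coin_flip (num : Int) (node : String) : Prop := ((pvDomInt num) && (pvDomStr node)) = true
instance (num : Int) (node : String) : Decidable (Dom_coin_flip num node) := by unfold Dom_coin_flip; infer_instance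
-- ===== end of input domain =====

-- B computes A's nine hardcoded flip sets as 3x3 Lights-Out neighbourhoods (divmod row/col, Manhattan distance ≤ 1) in one loop over positions 1..9; objective: alternative.


-- ===== PORT A =====
-- flip: returns None ('none') on anything other than '0'/'1', exactly like Python's flip
def flipP (c : Option Char) : Option Char :=
  if c = some '0' then some '1' else if c = some '1' then some '0' else none

-- l[k] = flip(l[k]): get (none = IndexError), flip, set; the same statement both Pythons use
def flipAt (l : List (Option Char)) (k : Int) : Option (List (Option Char)) :=
  match PySem.List.pyGet? l k with
  | none => none
  | some c => PySem.List.pySet? l k (flipP c)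

-- the 'new_node += i' loop of A: a None element is Python's TypeError ('none')
def joinLoop (l : List (Option Char)) : Option String :=
  (l.foldlM (fun acc c? => Option.map (fun c => acc ++ [c]) c?) ([] : List Char)).map String.ofList

def coin_flip (num : Int) (node : String) : String :=
  let l : Option (List (Option Char)) := some (node.toList.map some)
  let l := if num = 1 then ((l.bind (flipAt · (-1))).bind (flipAt · (-2))).bind (flipAt · (-4)) else l
  let l := if num = 2 then (((l.bind (flipAt · (-1))).bind (flipAt · (-2))).bind (flipAt · (-3))).bind (flipAt · (-5)) else l
  let l := if num = 3 then ((l.bind (flipAt · (-2))).bind (flipAt · (-3))).bind (flipAt · (-6)) else l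
  let l := if num = 4 then (((l.bind (flipAt · (-1))).bind (flipAt · (-4))).bind (flipAt · (-5))).bind (flipAt · (-7)) else l
  let l := if num = 5 then ((((l.bind (flipAt · (-2))).bind (flipAt · (-4))).bind (flipAt · (-5))).bind (flipAt · (-6))).bind (flipAt · (-8)) else l
  let l := if num = 6 then (((l.bind (flipAt · (-3))).bind (flipAt · (-5))).bind (flipAt · (-6))).bind (flipAt · (-9)) else l
  let l := if num = 7 then ((l.bind (flipAt · (-4))).bind (flipAt · (-7))).bind (flipAt · (-8)) else l
  let l := if num = 8 then (((l.bind (flipAt · (-5))).bind (flipAt · (-7))).bind (flipAt · (-8))).bind (flipAt · (-9)) else l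
  let l := if num = 9 then ((l.bind (flipAt · (-6))).bind (flipAt · (-8))).bind (flipAt · (-9)) else l
  match l.bind joinLoop with
  | some s => s
  | none => ""   -- unreachable under Pre_ (Python raises here)

-- ===== PORT B =====
-- |r-rj| + |c-cj| <= 1 with (r,c) = divmod(num-1,3), (rj,cj) = divmod(j-1,3)
def nbhd (num j : Int) : Bool :=
  let r := PySem.Int.floordiv (num - 1) 3
  let c := PySem.Int.mod (num - 1) 3
  let rj := PySem.Int.floordiv (j - 1) 3
  let cj := PySem.Int.mod (j - 1) 3
  decide ((r - rj).natAbs + (c - cj).natAbs ≤ 1)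

def coin_flip_alt (num : Int) (node : String) : String :=
  let l0 := node.toList.map some
  let res :=
    if 1 ≤ num ∧ num ≤ 9 then
      (PySem.List.pyRange 1 10 1).foldlM
        (fun l j => if nbhd num j then flipAt l (-j) else some l) l0
    else some l0
  match res.bind (fun l => (l.mapM id).map String.ofList) with   -- ''.join(l): TypeError on a None element
  | some s => s
  | none => ""   -- unreachable under Pre_ (Python raises here)

-- ===== PRECONDITION & SPEC =====
-- Pre_ excludes exactly the inputs where Python A raises: a flipped index out of range (IndexError)
-- or a flipped position not '0'/'1' (None stored, TypeError on concatenation).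
def preIdx (num : Int) : List Int :=
  if num = 1 then [-1, -2, -4] else if num = 2 then [-1, -2, -3, -5]
  else if num = 3 then [-2, -3, -6] else if num = 4 then [-1, -4, -5, -7]
  else if num = 5 then [-2, -4, -5, -6, -8] else if num = 6 then [-3, -5, -6, -9]
  else if num = 7 then [-4, -7, -8] else if num = 8 then [-5, -7, -8, -9]
  else if num = 9 then [-6, -8, -9] else []

def Pre_coin_flip (num : Int) (node : String) : Prop :=
  ∀ k ∈ preIdx num, PySem.List.pyGet? node.toList k = some '0' ∨ PySem.List.pyGet? node.toList k = some '1'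
instance (num : Int) (node : String) : Decidable (Pre_coin_flip num node) := by unfold Pre_coin_flip; infer_instance

def pvWitness_coin_flip : Int × String := (1, "000000000")

def Spec_coin_flip (num : Int) (node : String) (out : String) : Prop := out = coin_flip_alt num node
instance (num : Int) (node : String) (out : String) : Decidable (Spec_coin_flip num node out) := by unfold Spec_coin_flip; infer_instance

-- ===== CLAIM =====
def Claim_equal_coin_flip : Prop := ∀ (num : Int) (node : String), Dom_coin_flip num node → Pre_coin_flip num node → Spec_coin_flip num node (coin_flip num node)

-- ===== LEMMAS AND PROOFS =====
theorem joinLoop_eq (l : List (Option Char)) :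
    joinLoop l = (l.mapM id).map String.ofList := by
  unfold joinLoop
  suffices h : ∀ (l : List (Option Char)) (acc : List Char),
      l.foldlM (fun acc c? => Option.map (fun c => acc ++ [c]) c?) acc
        = (l.mapM id).map (fun cs => acc ++ cs) by
    rw [h l []]
    cases l.mapM id <;> simp
  intro l
  induction l with
  | nil => intro acc; rw [List.mapM_nil]; simp [List.foldlM]
  | cons c? l ih =>
    intro acc
    cases c? with
    | none => simp [List.mapM_cons]
    | some c =>
      simp only [List.foldlM_cons, List.mapM_cons, Option.map_some, id, bind, Option.bind]
      rw [ih (acc ++ [c])]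
      cases h : l.mapM id <;> simp

theorem mapM_some_eq (l : List Char) : l.mapM some = some l := by
  induction l with
  | nil => rw [List.mapM_nil]; rfl
  | cons c l ih => rw [List.mapM_cons]; simp [ih]

-- B's guarded fold = the fold over the filtered index list (closed per num, so it decides)
theorem fold_filter (p : Int → Bool) (xs : List Int) (l0 : List (Option Char)) :
    xs.foldlM (fun l j => if p j then flipAt l (-j) else some l) l0
      = (xs.filter p).foldlM (fun l j => flipAt l (-j)) l0 := by
  induction xs generalizing l0 with
  | nil => rfl
  | cons j xs ih =>
    by_cases h : p j
    · simp only [List.foldlM_cons, List.filter_cons, h, if_pos]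
      cases flipAt l0 (-j) with
      | none => simp only [bind, Option.bind]
      | some l1 => simp [bind, ih]
    · simp [List.foldlM_cons, h, bind, ih]

theorem range19 : PySem.List.pyRange 1 10 1 = [1,2,3,4,5,6,7,8,9] := by decide

-- ===== VERDICT =====
theorem coin_flip_spec : Claim_equal_coin_flip := by
  intro num node _ _
  unfold Spec_coin_flip coin_flip coin_flip_alt
  simp only [range19, fold_filter]
  by_cases h1 : num = 1
  · subst h1; norm_num [joinLoop_eq, Option.bind_assoc, List.filter, nbhd, List.foldlM, bind]
  by_cases h2 : num = 2
  · subst h2; norm_num [joinLoop_eq, Option.bind_assoc, List.filter, nbhd, List.foldlM, bind]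
  by_cases h3 : num = 3
  · subst h3; norm_num [joinLoop_eq, Option.bind_assoc, List.filter, nbhd, List.foldlM, bind]
  by_cases h4 : num = 4
  · subst h4; norm_num [joinLoop_eq, Option.bind_assoc, List.filter, nbhd, List.foldlM, bind]
  by_cases h5 : num = 5
  · subst h5; norm_num [joinLoop_eq, Option.bind_assoc, List.filter, nbhd, List.foldlM, bind]
  by_cases h6 : num = 6
  · subst h6; norm_num [joinLoop_eq, Option.bind_assoc, List.filter, nbhd, List.foldlM, bind]
  by_cases h7 : num = 7
  · subst h7; norm_num [joinLoop_eq, Option.bind_assoc, List.filter, nbhd, List.foldlM, bind]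
  by_cases h8 : num = 8
  · subst h8; norm_num [joinLoop_eq, Option.bind_assoc, List.filter, nbhd, List.foldlM, bind]
  by_cases h9 : num = 9
  · subst h9; norm_num [joinLoop_eq, Option.bind_assoc, List.filter, nbhd, List.foldlM, bind]
  · have hr : ¬ (1 ≤ num ∧ num ≤ 9) := by omega
    simp [h1, h2, h3, h4, h5, h6, h7, h8, h9, hr, joinLoop_eq, mapM_some_eq]
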